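-- pv_equiv track=rewrite | github.com/pisan382/choose-your-own-adventure | scripts/render_graph_svg.py | build_preds
-- ===== SOURCE A (Python) =====
-- from typing import Dict, Iterable, List, Set, Tuple
--
-- def build_preds(nodes: List[int], edges: Dict[int, List[int]]) -> Dict[int, List[int]]:
--     preds = {n: [] for n in nodes}
--     for src in nodes:
--         for dst in edges.get(src, []):
--             preds.setdefault(dst, []).append(src)
--     for k in preds:
--         preds[k].sort()
--     return preds
-- ===== SOURCE B (Python) =====
-- from typing import Dict, List
--
-- def build_preds(nodes: List[int], edges: Dict[int, List[int]]) -> Dict[int, List[int]]: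
--     # Collect every edge once as a (dst, src) pair, in scan order.
--     pairs = [(dst, src) for src in nodes for dst in edges.get(src, [])]
--     preds = {n: [] for n in nodes}
--     # Register destination keys in first-encounter order (matches dict key order).
--     for dst, _ in pairs:
--         preds.setdefault(dst, [])
--     # One global lexicographic sort; bucketing then emits each list already sorted.
--     for dst, src in sorted(pairs):
--         preds[dst].append(src)
--     return preds
-- ===== Notes on version B (the rewrite author's own statement) =====
-- stated objective: alternative
-- what changed: Instead of appending into per-destination lists during the node scan and sorting each list afterwards, B builds one flat (dst, src) edge table, sorts it once lexicographically, and buckets it so every predecessor list comes out already sorted, with a separate key-registration pass preserving the dict's key order.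
import Mathlib
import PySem

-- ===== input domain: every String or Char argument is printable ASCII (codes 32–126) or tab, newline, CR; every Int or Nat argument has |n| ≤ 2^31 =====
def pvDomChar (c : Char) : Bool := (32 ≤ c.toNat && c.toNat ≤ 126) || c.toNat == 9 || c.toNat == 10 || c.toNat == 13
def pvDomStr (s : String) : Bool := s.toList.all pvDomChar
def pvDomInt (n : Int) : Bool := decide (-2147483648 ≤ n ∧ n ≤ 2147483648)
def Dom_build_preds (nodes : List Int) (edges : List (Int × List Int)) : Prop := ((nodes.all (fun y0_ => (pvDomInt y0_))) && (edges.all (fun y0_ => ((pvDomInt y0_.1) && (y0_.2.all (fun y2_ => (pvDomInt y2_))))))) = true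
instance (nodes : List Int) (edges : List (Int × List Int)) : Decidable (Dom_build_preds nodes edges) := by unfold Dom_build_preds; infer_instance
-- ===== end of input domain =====

-- B replaces A's per-destination-list post-sort by one global lexicographic sort of a flat
-- (dst, src) edge table followed by a bucketing pass (objective: alternative, same cost).

-- ===== PORT A =====
def build_preds (nodes : List Int) (edges : List (Int × List Int)) : List (Int × List Int) :=
  -- preds = {n: [] for n in nodes}
  let preds0 := nodes.foldl (fun d n => d.insert n ([] : List Int)) PySem.Dict.empty
  -- for src in nodes: for dst in edges.get(src, []):
  --   preds.setdefault(dst, []).append(src)   -- exactly Dict.modify dst [] (· ++ [src])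
  let preds1 := nodes.foldl (fun d src =>
    ((PySem.Dict.mk edges).getD src []).foldl
      (fun d dst => d.modify dst [] (fun v => v ++ [src])) d) preds0
  -- for k in preds: preds[k].sort()
  (preds1.keys.foldl (fun d k =>
    d.modify k [] (fun v => PySem.List.sorted v (fun x => x) false)) preds1).items

-- ===== PORT B =====
-- pairs = [(dst, src) for src in nodes for dst in edges.get(src, [])]
def pvPairs (nodes : List Int) (edges : List (Int × List Int)) : List (Int × Int) :=
  nodes.flatMap (fun src => ((PySem.Dict.mk edges).getD src []).map (fun dst => (dst, src)))

def build_preds_alt (nodes : List Int) (edges : List (Int × List Int)) : List (Int × List Int) :=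
  let pairs := pvPairs nodes edges
  -- preds = {n: [] for n in nodes}
  let preds0 := nodes.foldl (fun d n => d.insert n ([] : List Int)) PySem.Dict.empty
  -- for dst, _ in pairs: preds.setdefault(dst, [])
  let preds1 := pairs.foldl (fun d p => d.setdefault p.1 ([] : List Int)) preds0
  -- for dst, src in sorted(pairs): preds[dst].append(src)
  (((PySem.List.sorted2 pairs (fun p => p.1) (fun p => p.2) false).foldl
    (fun d p => d.modify p.1 [] (fun v => v ++ [p.2])) preds1)).items

-- ===== PRECONDITION & SPEC =====
def Spec_build_preds (nodes : List Int) (edges : List (Int × List Int)) (out : List (Int × List Int)) : Prop := out = build_preds_alt nodes edges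
instance (nodes : List Int) (edges : List (Int × List Int)) (out : List (Int × List Int)) : Decidable (Spec_build_preds nodes edges out) := by unfold Spec_build_preds; infer_instance

-- ===== CLAIM (what is proved, stated in full; the proofs are below) =====
def Claim_equal_build_preds : Prop := ∀ (nodes : List Int) (edges : List (Int × List Int)), Dom_build_preds nodes edges → Spec_build_preds nodes edges (build_preds nodes edges)

-- ===== LEMMAS AND PROOFS =====

-- the lexicographic order produced by sorted(pairs) on int pairs
def pvLexLe (p q : Int × Int) : Prop := p.1 < q.1 ∨ (p.1 = q.1 ∧ p.2 ≤ q.2)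

theorem pvLexLe_trans : Transitive pvLexLe := by
  intro a b c hab hbc
  unfold pvLexLe at *
  omega

theorem pairwise_insertBy {α : Type} (before : α → α → Bool) (R : α → α → Prop)
    (hc : ∀ a b, if before a b = true then R a b else R b a) (ht : Transitive R)
    (x : α) (ys : List α) (h : ys.Pairwise R) :
    (PySem.List.insertBy before x ys).Pairwise R := by
  induction ys with
  | nil => simp [PySem.List.insertBy]
  | cons y ys ih =>
    rcases h with _ | ⟨hy, hys⟩
    by_cases hb : before x y = true
    · have hxy : R x y := by have := hc x y; simpa [hb] using this
      simp only [PySem.List.insertBy, hb, if_pos]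
      exact List.Pairwise.cons (by
        intro z hz
        rcases List.mem_cons.mp hz with rfl | hz
        · exact hxy
        · exact ht hxy (hy z hz)) (List.Pairwise.cons hy hys)
    · have hyx : R y x := by have := hc x y; simpa [hb] using this
      simp only [PySem.List.insertBy, hb, if_neg, Bool.false_eq_true, not_false_iff]
      exact List.Pairwise.cons (by
        intro z hz
        rw [PySem.List.mem_insertBy] at hz
        rcases hz with rfl | hz
        · exact hyx
        · exact hy z hz) (ih hys)

theorem pairwise_foldl_insertBy {α : Type} (before : α → α → Bool) (R : α → α → Prop)
    (hc : ∀ a b, if before a b = true then R a b else R b a) (ht : Transitive R)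
    (xs : List α) (acc : List α) (h : acc.Pairwise R) :
    (xs.foldl (fun acc x => PySem.List.insertBy before x acc) acc).Pairwise R := by
  induction xs generalizing acc with
  | nil => simpa using h
  | cons x xs ih => exact ih _ (pairwise_insertBy before R hc ht x acc h)

theorem sorted2_pairwise_lex (pairs : List (Int × Int)) :
    (PySem.List.sorted2 pairs (fun p => p.1) (fun p => p.2) false).Pairwise pvLexLe := by
  show (List.foldl (fun acc x => PySem.List.insertBy
    (fun a b => decide (a.1 < b.1) || (!decide (b.1 < a.1) && decide (a.2 < b.2))) x acc)
    [] pairs).Pairwise pvLexLe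
  apply pairwise_foldl_insertBy _ pvLexLe _ pvLexLe_trans _ [] List.Pairwise.nil
  intro a b
  by_cases h : (decide (a.1 < b.1) || (!decide (b.1 < a.1) && decide (a.2 < b.2))) = true
  · rw [if_pos h]
    simp only [Bool.or_eq_true, Bool.and_eq_true, decide_eq_true_eq, Bool.not_eq_true',
      decide_eq_false_iff_not] at h
    unfold pvLexLe
    omega
  · rw [if_neg h]
    simp only [Bool.or_eq_true, Bool.and_eq_true, decide_eq_true_eq, Bool.not_eq_true',
      decide_eq_false_iff_not, not_or, not_and] at h
    unfold pvLexLe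
    omega

-- filtering one destination's bucket out of the globally sorted pair list
-- yields exactly the sort of that destination's source list
theorem group_of_sorted2 (pairs : List (Int × Int)) (k : Int) :
    PySem.List.sorted ((pairs.filter (fun p => p.1 == k)).map (fun p => p.2)) (fun x => x) false
      = ((PySem.List.sorted2 pairs (fun p => p.1) (fun p => p.2) false).filter
          (fun p => p.1 == k)).map (fun p => p.2) := by
  apply PySem.List.sorted_id_eq_of_perm_of_pairwise
  · exact ((PySem.List.sorted2_perm pairs _ _ false).filter _).map _
  · rw [List.pairwise_map]
    refine List.Pairwise.imp_of_mem ?_ ((sorted2_pairwise_lex pairs).filter _)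
    intro a b ha hb hR
    have ha1 : a.1 = k := by simpa using (List.of_mem_filter ha)
    have hb1 : b.1 = k := by simpa using (List.of_mem_filter hb)
    unfold pvLexLe at hR
    omega

-- the dict comprehension {n: [] for n in nodes}: every value is []
theorem init_getD (nodes : List Int) (k : Int) :
    ((nodes.foldl (fun d n => d.insert n ([] : List Int)) PySem.Dict.empty).getD k []) = [] := by
  have : ∀ (l : List Int) (d : PySem.Dict Int (List Int)), d.getD k [] = [] →
      (l.foldl (fun d n => d.insert n ([] : List Int)) d).getD k [] = [] := by
    intro l
    induction l with
    | nil => intro d h; simpa using h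
    | cons n l ih =>
      intro d h
      simp only [List.foldl_cons]
      exact ih _ (by rw [PySem.Dict.getD_insert]; split <;> simp [h])
  exact this nodes _ (by simp)

-- the setdefault pass changes no value (present keys keep theirs, new keys get [])
theorem sd_getD (l : List (Int × Int)) (d : PySem.Dict Int (List Int)) (k : Int) :
    ((l.foldl (fun d p => d.setdefault p.1 ([] : List Int)) d).getD k []) = d.getD k [] := by
  induction l generalizing d with
  | nil => simp
  | cons p l ih =>
    simp only [List.foldl_cons]
    rw [ih]
    by_cases h : k = p.1
    · subst h; exact PySem.Dict.getD_setdefault_self d p.1 [] []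
    · rw [PySem.Dict.getD_eq_get?_getD, PySem.Dict.get?_setdefault_of_ne d [] h,
        ← PySem.Dict.getD_eq_get?_getD]

-- the setdefault pass registers keys exactly like an insert/modify pass would
theorem sd_keys (l : List (Int × Int)) (d : PySem.Dict Int (List Int)) :
    ((l.foldl (fun d p => d.setdefault p.1 ([] : List Int)) d).keys)
      = PySem.Set.update d.keys (l.map (fun p => p.1)) := by
  induction l generalizing d with
  | nil => simp [PySem.Set.update]
  | cons p l ih =>
    simp only [List.foldl_cons, List.map_cons]
    rw [ih]
    have : (d.setdefault p.1 ([] : List Int)).keys = PySem.Set.add d.keys p.1 := by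
      rw [PySem.Dict.keys_setdefault]
      unfold PySem.Set.add
      have hiff : PySem.Set.contains d.keys p.1 = d.contains p.1 := by
        by_cases h : d.contains p.1 = true
        · simp only [h]
          simpa [PySem.Set.contains] using (PySem.Dict.contains_iff_mem_keys d p.1).mp h
        · simp only [Bool.not_eq_true] at h
          simp only [h]
          simp only [PySem.Set.contains, List.contains_eq_mem, decide_eq_false_iff_not]
          intro hm
          exact absurd ((PySem.Dict.contains_iff_mem_keys d p.1).mpr hm) (by simp [h])
      rw [hiff]
    rw [this]
    rfl

-- updating a set with elements it already has is a no-op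
theorem set_update_noop (s : PySem.Set Int) (l : List Int) (h : ∀ x ∈ l, x ∈ s) :
    PySem.Set.update s l = s := by
  induction l generalizing s with
  | nil => rfl
  | cons x l ih =>
    have : PySem.Set.add s x = s := by
      unfold PySem.Set.add
      rw [if_pos (by simpa [PySem.Set.contains] using h x (by simp))]
    show PySem.Set.update (PySem.Set.add s x) l = s
    rw [this]
    exact ih s (fun y hy => h y (by simp [hy]))

-- the final per-key sort loop, read entrywise
theorem sort_fold_getD (l : List Int) (hl : l.Nodup) (d : PySem.Dict Int (List Int)) (c : Int) :
    ((l.foldl (fun d k =>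
        d.modify k [] (fun v => PySem.List.sorted v (fun x => x) false)) d).getD c [])
      = if c ∈ l then PySem.List.sorted (d.getD c []) (fun x => x) false else d.getD c [] := by
  induction l generalizing d with
  | nil => simp
  | cons a l ih =>
    rcases List.nodup_cons.mp hl with ⟨hna, hnl⟩
    simp only [List.foldl_cons]
    rw [ih hnl]
    by_cases hc : c ∈ l
    · have hca : c ≠ a := fun h => hna (h ▸ hc)
      rw [if_pos hc, if_pos (by simp [hc]), PySem.Dict.getD_modify, if_neg hca]
    · rw [if_neg hc, PySem.Dict.getD_modify]
      by_cases hca : c = a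
      · subst hca
        rw [if_pos rfl, if_pos (by simp)]
      · rw [if_neg hca, if_neg (by simp [hc, hca])]

-- ===== VERDICT (by name: the statement is the Claim_ definition above) =====
theorem build_preds_spec : Claim_equal_build_preds := by
  intro nodes edges _
  unfold Spec_build_preds build_preds build_preds_alt
  simp only []
  -- shared pieces
  set preds0 : PySem.Dict Int (List Int) :=
    nodes.foldl (fun d n => d.insert n ([] : List Int)) PySem.Dict.empty with hpreds0
  set pairs := pvPairs nodes edges with hpairs
  set spairs := PySem.List.sorted2 pairs (fun p => p.1) (fun p => p.2) false with hspairs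
  -- A's nested loop is the modify-fold over the flat pair list
  have hA1 : (nodes.foldl (fun d src =>
      ((PySem.Dict.mk edges).getD src []).foldl
        (fun d dst => d.modify dst [] (fun v => v ++ [src])) d) preds0)
      = pairs.foldl (fun d p => d.modify p.1 [] (fun v => v ++ [p.2])) preds0 := by
    rw [hpairs]
    unfold pvPairs
    rw [List.foldl_flatMap]
    congr 1
    funext d src
    rw [List.foldl_map]
  rw [hA1]
  set dA : PySem.Dict Int (List Int) :=
    pairs.foldl (fun d p => d.modify p.1 [] (fun v => v ++ [p.2])) preds0 with hdA
  set dB1 : PySem.Dict Int (List Int) :=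
    pairs.foldl (fun d p => d.setdefault p.1 ([] : List Int)) preds0 with hdB1
  set dB2 : PySem.Dict Int (List Int) :=
    spairs.foldl (fun d p => d.modify p.1 [] (fun v => v ++ [p.2])) dB1 with hdB2
  set dA2 : PySem.Dict Int (List Int) :=
    dA.keys.foldl (fun d k =>
      d.modify k [] (fun v => PySem.List.sorted v (fun x => x) false)) dA with hdA2
  -- key sets
  have hpreds0_nodup : preds0.keys.Nodup := by
    rw [hpreds0]
    exact PySem.Dict.nodup_keys_foldl_insert nodes (fun _ _ => []) _ (by simp)
  have hkA : dA.keys = PySem.Set.update preds0.keys (pairs.map (fun p => p.1)) := by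
    rw [hdA]
    exact PySem.Dict.keys_foldl_modify_key pairs (fun p => p.1) []
      (fun _ p v => v ++ [p.2]) preds0
  have hkA_nodup : dA.keys.Nodup := by
    rw [hdA]
    exact PySem.Dict.nodup_keys_foldl_modify_key pairs (fun p => p.1) []
      (fun _ p v => v ++ [p.2]) preds0 hpreds0_nodup
  have hkB1 : dB1.keys = dA.keys := by
    rw [hdB1, sd_keys, hkA]
  have hkB2 : dB2.keys = dA.keys := by
    rw [hdB2, PySem.Dict.keys_foldl_modify_key spairs (fun p => p.1) []
      (fun _ p v => v ++ [p.2]) dB1, hkB1]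
    apply set_update_noop
    intro x hx
    rcases List.mem_map.mp hx with ⟨p, hp, rfl⟩
    have hp' : p ∈ pairs := (PySem.List.sorted2_perm pairs _ _ false).mem_iff.mp hp
    rw [hkA]
    exact (PySem.Set.mem_update _ _ _).mpr (Or.inr (List.mem_map_of_mem hp'))
  have hkA2 : dA2.keys = dA.keys := by
    rw [hdA2, PySem.Dict.keys_foldl_modify_key dA.keys (fun k => k) []
      (fun _ k v => PySem.List.sorted v (fun x => x) false) dA]
    simp only [List.map_id_fun', id]
    exact set_update_noop _ _ (fun x hx => hx)
  have hkA2_nodup : dA2.keys.Nodup := hkA2 ▸ hkA_nodup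
  have hkB2_nodup : dB2.keys.Nodup := hkB2 ▸ hkA_nodup
  -- values, entrywise
  have hvA : ∀ k, dA.getD k [] = (pairs.filter (fun p => p.1 == k)).map (fun p => p.2) := by
    intro k
    rw [hdA, PySem.Dict.getD_foldl_modify_append, hpreds0, init_getD]
    rfl
  have hvB : ∀ k, dB2.getD k [] = (spairs.filter (fun p => p.1 == k)).map (fun p => p.2) := by
    intro k
    rw [hdB2, PySem.Dict.getD_foldl_modify_append, hdB1, sd_getD, hpreds0, init_getD]
    rfl
  -- assemble the items lists
  rw [PySem.Dict.items_eq_map_keys dA2 hkA2_nodup [],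
      PySem.Dict.items_eq_map_keys dB2 hkB2_nodup [], hkA2, hkB2]
  apply List.map_congr_left
  intro k hk
  have : dA2.getD k [] = PySem.List.sorted (dA.getD k []) (fun x => x) false := by
    rw [hdA2, sort_fold_getD dA.keys hkA_nodup dA k, if_pos hk]
  rw [this, hvA, hvB, group_of_sorted2]
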